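-- pv_equiv track=rewrite | github.com/abhiibajaj/ChexersAI | stickyFingers/utility_methods.py | close_by_friends
-- ===== SOURCE A (Python) =====
-- def radial_moves(piece, radius):
--     """
--     Helper function to find all radial moves outward from a center coordinate.
--     Arguments:
--     * `piece` -- a 2 tuple of coordinates (x, y), taken as the center.
--     * `radius` -- the range of the radius outwards,
--         ie. radius 1 = a regular move
--         radius 2 = a jump move
--     """
--
--     east = (piece[0] + radius, piece[1])
--     west = (piece[0] - radius, piece[1])
--     northwest = (piece[0], piece[1] - radius)
--     northeast = (piece[0] + radius, piece[1] - radius)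
--     southwest = (piece[0] - radius, piece[1] + radius)
--     southeast = (piece[0], piece[1] + radius)
--
--     return [east, west, northeast, northwest, southeast, southwest]
--
-- def close_by_friends(piece, player_colour, board):
--     """
--     Helper function that returns the friendly pieces that a given piece
--     is neighbouring
--
--     Arguments:
--     * `piece` -- a 2 tuple of coordinates (x, y), taken as the center.
--     * `player_colour` -- string enum, "red", "green", "blue"
--     * `board` -- a set of pieces that represent a board
--     """
--
--     # return friendly pieces that you are close to
--     friendly_pieces = 0
--     possible_radials = radial_moves(piece, 1)
--
--     for radial in possible_radials:
--         # check if the radial is the same colour as you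
--         try:
--             collision_piece = board[radial]
--             if collision_piece == player_colour:
--                 friendly_pieces += 1
--         except KeyError:
--             pass
--     return friendly_pieces
-- ===== SOURCE B (Python) =====
-- # B: single scan over the board items testing adjacency by offset, instead of probing six fixed positions.
-- _OFFSETS = {(1, 0), (-1, 0), (1, -1), (0, -1), (0, 1), (-1, 1)}
--
-- def close_by_friends(piece, player_colour, board):
--     px, py = piece
--     friendly = 0
--     for (x, y), colour in board.items():
--         if colour == player_colour and (x - px, y - py) in _OFFSETS:
--             friendly += 1
--     return friendly
-- ===== Notes on version B (the rewrite author's own statement) =====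
-- stated objective: alternative
-- what changed: A probes the six fixed neighbor coordinates and looks each up in the board dict; B instead makes one pass over the board's items and counts entries whose colour matches and whose coordinate offset from the piece is one of the six neighbor offsets.
import Mathlib
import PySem

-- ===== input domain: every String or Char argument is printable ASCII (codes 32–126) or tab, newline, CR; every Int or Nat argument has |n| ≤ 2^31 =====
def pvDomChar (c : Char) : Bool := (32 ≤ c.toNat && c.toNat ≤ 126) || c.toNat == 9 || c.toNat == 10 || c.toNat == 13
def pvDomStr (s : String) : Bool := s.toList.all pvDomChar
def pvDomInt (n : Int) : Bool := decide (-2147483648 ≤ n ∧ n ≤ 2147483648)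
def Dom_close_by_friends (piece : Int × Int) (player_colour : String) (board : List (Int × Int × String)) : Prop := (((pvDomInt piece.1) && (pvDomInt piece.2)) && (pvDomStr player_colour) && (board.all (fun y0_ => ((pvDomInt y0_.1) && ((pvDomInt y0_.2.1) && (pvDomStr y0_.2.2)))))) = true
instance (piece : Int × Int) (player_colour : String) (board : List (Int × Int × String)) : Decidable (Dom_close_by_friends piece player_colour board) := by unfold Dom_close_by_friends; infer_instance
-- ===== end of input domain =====

-- B replaces A's six fixed-position dict probes by a single scan over the board items
-- testing adjacency via a set of the six neighbor offsets (alternative decomposition, not faster).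


-- ===== PORT A =====
-- dict lookup `board[radial]` on the association list (first match); None = KeyError
def cbf_lookup (board : List (Int × Int × String)) (k : Int × Int) : Option String :=
  (board.find? (fun e => e.1 == k.1 && e.2.1 == k.2)).map (fun e => e.2.2)

def radial_moves (piece : Int × Int) (radius : Int) : List (Int × Int) :=
  let east := (piece.1 + radius, piece.2)
  let west := (piece.1 - radius, piece.2)
  let northwest := (piece.1, piece.2 - radius)
  let northeast := (piece.1 + radius, piece.2 - radius)
  let southwest := (piece.1 - radius, piece.2 + radius)
  let southeast := (piece.1, piece.2 + radius)
  [east, west, northeast, northwest, southeast, southwest]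

def close_by_friends (piece : Int × Int) (player_colour : String) (board : List (Int × Int × String)) : Int :=
  let possible_radials := radial_moves piece 1
  possible_radials.foldl (fun friendly_pieces radial =>
    match cbf_lookup board radial with
    | some collision_piece =>
        if collision_piece == player_colour then friendly_pieces + 1 else friendly_pieces
    | none => friendly_pieces) 0

-- ===== PORT B =====
def cbf_offsets : List (Int × Int) := [(1, 0), (-1, 0), (1, -1), (0, -1), (0, 1), (-1, 1)]

def close_by_friends_alt (piece : Int × Int) (player_colour : String) (board : List (Int × Int × String)) : Int :=
  ((board.countP (fun e =>
      e.2.2 == player_colour && cbf_offsets.contains (e.1 - piece.1, e.2.1 - piece.2)) : Nat) : Int)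

-- ===== PRECONDITION & SPEC =====
-- Pre_ excludes association lists with duplicate (x,y) keys: such lists do not represent any
-- Python dict input (a dict has unique keys), so A's first-match lookup semantics on them is arbitrary.
def Pre_close_by_friends (piece : Int × Int) (player_colour : String) (board : List (Int × Int × String)) : Prop :=
  (board.map (fun e => (e.1, e.2.1))).Nodup
instance (piece : Int × Int) (player_colour : String) (board : List (Int × Int × String)) : Decidable (Pre_close_by_friends piece player_colour board) := by unfold Pre_close_by_friends; infer_instance

def pvWitness_close_by_friends : (Int × Int) × String × (List (Int × Int × String)) :=
  ((0, 0), "red", [(1, 0, "red"), (0, 1, "blue")])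

def Spec_close_by_friends (piece : Int × Int) (player_colour : String) (board : List (Int × Int × String)) (out : Int) : Prop := out = close_by_friends_alt piece player_colour board
instance (piece : Int × Int) (player_colour : String) (board : List (Int × Int × String)) (out : Int) : Decidable (Spec_close_by_friends piece player_colour board out) := by unfold Spec_close_by_friends; infer_instance

-- ===== CLAIM (what is proved, stated in full; the proofs are below) =====
def Claim_equal_close_by_friends : Prop := ∀ (piece : Int × Int) (player_colour : String) (board : List (Int × Int × String)), Dom_close_by_friends piece player_colour board → Pre_close_by_friends piece player_colour board → Spec_close_by_friends piece player_colour board (close_by_friends piece player_colour board)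

-- ===== LEMMAS AND PROOFS =====

-- key of a board entry
def cbf_key (e : Int × Int × String) : Int × Int := (e.1, e.2.1)

-- per-radial contribution of A's loop body
def cbf_g (pc : String) (board : List (Int × Int × String)) (r : Int × Int) : Int :=
  match cbf_lookup board r with
  | some c => if c == pc then 1 else 0
  | none => 0

lemma cbf_foldl_eq_sum (pc : String) (board : List (Int × Int × String)) :
    ∀ (L : List (Int × Int)) (n : Int),
      L.foldl (fun acc r =>
        match cbf_lookup board r with
        | some c => if c == pc then acc + 1 else acc
        | none => acc) n = n + (L.map (cbf_g pc board)).sum := by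
  intro L
  induction L with
  | nil => intro n; simp
  | cons r L ih =>
      intro n
      simp only [List.foldl_cons, List.map_cons, List.sum_cons, ih]
      unfold cbf_g
      cases cbf_lookup board r with
      | none => ring
      | some c => by_cases h : c == pc <;> simp [h] <;> ring

lemma cbf_lookup_cons (e : Int × Int × String) (rest : List (Int × Int × String)) (r : Int × Int) :
    cbf_lookup (e :: rest) r = if cbf_key e = r then some e.2.2 else cbf_lookup rest r := by
  by_cases h : e.1 = r.1 ∧ e.2.1 = r.2
  · have hpred : (e.1 == r.1 && e.2.1 == r.2) = true := by simp [h.1, h.2]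
    have heq : cbf_key e = r := by simp [cbf_key, Prod.ext_iff, h.1, h.2]
    rw [cbf_lookup, List.find?_cons, hpred, if_pos heq]
    rfl
  · have hpred : (e.1 == r.1 && e.2.1 == r.2) = false := by
      rcases not_and_or.mp h with h' | h' <;> simp [h']
    have hne : cbf_key e ≠ r := by
      intro hc
      have h1 : e.1 = r.1 := congrArg Prod.fst hc
      have h2 : e.2.1 = r.2 := congrArg Prod.snd hc
      tauto
    rw [cbf_lookup, List.find?_cons, hpred, if_neg hne]
    rfl

lemma cbf_lookup_eq_none (rest : List (Int × Int × String)) (k : Int × Int)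
    (h : k ∉ rest.map cbf_key) : cbf_lookup rest k = none := by
  simp only [cbf_lookup, Option.map_eq_none_iff, List.find?_eq_none]
  intro e he
  have : cbf_key e ∈ rest.map cbf_key := List.mem_map_of_mem he
  intro hb
  apply h
  have : cbf_key e = k := by
    simp only [Bool.and_eq_true, beq_iff_eq] at hb
    simp [cbf_key, Prod.ext_iff, hb.1, hb.2]
  rwa [this] at ‹cbf_key e ∈ rest.map cbf_key›

lemma cbf_sum_cons (pc : String) (e : Int × Int × String) (rest : List (Int × Int × String))
    (hk : cbf_lookup rest (cbf_key e) = none) :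
    ∀ (L : List (Int × Int)), L.Nodup →
      (L.map (cbf_g pc (e :: rest))).sum
        = (L.map (cbf_g pc rest)).sum + (if cbf_key e ∈ L ∧ e.2.2 == pc then 1 else 0) := by
  intro L
  induction L with
  | nil => simp
  | cons r L ih =>
      intro hnd
      obtain ⟨hr, hnd'⟩ := List.nodup_cons.mp hnd
      simp only [List.map_cons, List.sum_cons, ih hnd', List.mem_cons]
      by_cases h : cbf_key e = r
      · have h1 : cbf_g pc (e :: rest) r = (if e.2.2 == pc then 1 else 0) := by
          simp [cbf_g, cbf_lookup_cons, h]
        have h2 : cbf_g pc rest r = 0 := by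
          simp [cbf_g, ← h, hk]
        simp only [h1, h2, h]
        by_cases hc : e.2.2 == pc <;> simp [hc, hr] <;> ring
      · have h1 : cbf_g pc (e :: rest) r = cbf_g pc rest r := by
          simp [cbf_g, cbf_lookup_cons, h]
        simp only [h1]
        simp [h]
        ring

lemma cbf_main (pc : String) (L : List (Int × Int)) (hL : L.Nodup) :
    ∀ (board : List (Int × Int × String)), (board.map cbf_key).Nodup →
      (L.map (cbf_g pc board)).sum
        = ((board.countP (fun e => e.2.2 == pc && decide (cbf_key e ∈ L)) : Nat) : Int) := by
  intro board
  induction board with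
  | nil =>
      intro _
      have hz : ∀ r, cbf_g pc ([] : List (Int × Int × String)) r = 0 := by
        intro r; simp [cbf_g, cbf_lookup]
      simp only [List.countP_nil, Nat.cast_zero]
      exact List.sum_eq_zero (by
        intro x hx
        obtain ⟨r, _, rfl⟩ := List.mem_map.mp hx
        exact hz r)
  | cons e rest ih =>
      intro hnd
      have hnd' := (List.nodup_cons.mp hnd).2
      have hke : cbf_key e ∉ rest.map cbf_key := (List.nodup_cons.mp hnd).1
      have hnone := cbf_lookup_eq_none rest (cbf_key e) hke
      rw [cbf_sum_cons pc e rest hnone L hL, ih hnd', List.countP_cons]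
      by_cases h1 : e.2.2 == pc <;> by_cases h2 : cbf_key e ∈ L <;>
        simp [h1, h2] <;> omega

lemma cbf_radials_nodup (piece : Int × Int) : (radial_moves piece 1).Nodup := by
  simp [radial_moves, Prod.ext_iff]
  omega

lemma cbf_offset_mem (piece : Int × Int) (a b : Int) :
    ((a - piece.1, b - piece.2) ∈ cbf_offsets) ↔ ((a, b) ∈ radial_moves piece 1) := by
  simp [cbf_offsets, radial_moves, Prod.ext_iff]
  omega

-- ===== VERDICT (by name: the statement is the Claim_ definition above) =====
theorem close_by_friends_spec : Claim_equal_close_by_friends := by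
  intro piece pc board _ hpre
  unfold Spec_close_by_friends close_by_friends close_by_friends_alt
  rw [cbf_foldl_eq_sum, zero_add,
      cbf_main pc (radial_moves piece 1) (cbf_radials_nodup piece) board hpre]
  congr 1
  apply List.countP_congr
  intro e _
  have := cbf_offset_mem piece e.1 e.2.1
  simp only [cbf_key] at *
  by_cases h1 : e.2.2 == pc <;> by_cases h2 : (e.1, e.2.1) ∈ radial_moves piece 1 <;>
    simp [h1, h2, this]
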